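-- pv_equiv track=rewrite | github.com/stpf99/topky_enc_dec | toptopuw_vlc.py | _build_zigzag
-- ===== SOURCE A (Python) =====
-- def _build_zigzag(n: int) -> list:
--     """Zwraca listę (row, col) w kolejności zigzag dla bloku n×n."""
--     idx = []
--     for s in range(2 * n - 1):
--         if s % 2 == 0:
--             r = min(s, n - 1);  c = s - r
--             while r >= 0 and c < n:
--                 idx.append((r, c));  r -= 1;  c += 1
--         else:
--             c = min(s, n - 1);  r = s - c
--             while c >= 0 and r < n:
--                 idx.append((r, c));  r += 1;  c -= 1
--     return idx
-- ===== SOURCE B (Python) =====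
-- def _build_zigzag(n: int) -> list:
--     """Zwraca listę (row, col) w kolejności zigzag dla bloku n×n."""
--     diags = [[] for _ in range(2 * n - 1)]
--     for r in range(n):
--         for c in range(n):
--             diags[r + c].append((r, c))
--     out = []
--     for s, d in enumerate(diags):
--         out.extend(reversed(d) if s % 2 == 0 else d)
--     return out
-- ===== Notes on version B (the rewrite author's own statement) =====
-- stated objective: alternative
-- what changed: Replaces A's per-diagonal directional walk (start-point arithmetic plus two while loops) with a single row-major pass that distributes every (r,c) into a bucket per anti-diagonal r+c, then concatenates the buckets, reversing the even ones.
import Mathlib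
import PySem

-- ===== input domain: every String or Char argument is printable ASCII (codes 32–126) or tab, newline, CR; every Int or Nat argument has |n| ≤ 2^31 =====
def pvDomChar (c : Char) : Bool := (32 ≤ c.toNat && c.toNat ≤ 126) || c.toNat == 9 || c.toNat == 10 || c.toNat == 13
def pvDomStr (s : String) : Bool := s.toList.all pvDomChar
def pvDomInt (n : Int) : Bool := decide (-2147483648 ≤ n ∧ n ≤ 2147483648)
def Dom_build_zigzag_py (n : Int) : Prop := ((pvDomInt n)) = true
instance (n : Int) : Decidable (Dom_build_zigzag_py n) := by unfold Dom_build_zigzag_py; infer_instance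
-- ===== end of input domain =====

-- B replaces A's per-diagonal directional walk with a single row-major pass that buckets
-- every (r,c) by its anti-diagonal r+c, then concatenates the buckets, reversing even ones.

-- ===== PORT A =====
-- inner while loop of the even-diagonal branch: while r >= 0 and c < n: append (r,c); r -= 1; c += 1
def zigEvenLoop (n r c : Int) (acc : List (Int × Int)) : List (Int × Int) :=
  if 0 ≤ r ∧ c < n then zigEvenLoop n (r - 1) (c + 1) (acc ++ [(r, c)]) else acc
termination_by (r + 1).toNat
decreasing_by omega

-- inner while loop of the odd-diagonal branch: while c >= 0 and r < n: append (r,c); r += 1; c -= 1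
def zigOddLoop (n r c : Int) (acc : List (Int × Int)) : List (Int × Int) :=
  if 0 ≤ c ∧ r < n then zigOddLoop n (r + 1) (c - 1) (acc ++ [(r, c)]) else acc
termination_by (c + 1).toNat
decreasing_by omega

def build_zigzag_py (n : Int) : List (Int × Int) :=
  (PySem.List.pyRange 0 (2 * n - 1) 1).foldl
    (fun idx s =>
      if PySem.Int.mod s 2 = 0 then
        let r := min s (n - 1)
        let c := s - r
        zigEvenLoop n r c idx
      else
        let c := min s (n - 1)
        let r := s - c
        zigOddLoop n r c idx)
    []

-- ===== PORT B =====
def build_zigzag_py_alt (n : Int) : List (Int × Int) :=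
  let diags0 := (PySem.List.pyRange 0 (2 * n - 1) 1).map (fun _ => ([] : List (Int × Int)))
  -- diags[r + c].append((r, c)) is read-modify-write of the bucket at index r + c
  let diags := (PySem.List.pyRange 0 n 1).foldl
    (fun d r => (PySem.List.pyRange 0 n 1).foldl
      (fun d c => PySem.List.pySetD d (r + c) (PySem.List.pyGetD d (r + c) [] ++ [(r, c)])) d)
    diags0
  (PySem.List.enumerate diags).foldl
    (fun out sd => out ++ (if PySem.Int.mod sd.1 2 = 0 then sd.2.reverse else sd.2)) []

-- ===== PRECONDITION & SPEC =====
def Spec_build_zigzag_py (n : Int) (out : List (Int × Int)) : Prop := out = build_zigzag_py_alt n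
instance (n : Int) (out : List (Int × Int)) : Decidable (Spec_build_zigzag_py n out) := by unfold Spec_build_zigzag_py; infer_instance

-- ===== CLAIM (what is proved, stated in full; the proofs are below) =====
def Claim_equal_build_zigzag_py : Prop := ∀ (n : Int), Dom_build_zigzag_py n → Spec_build_zigzag_py n (build_zigzag_py n)

-- ===== LEMMAS AND PROOFS =====

-- closed form of one diagonal of A's walk (in A's emission order)
def zigDiag (n s : Int) : List (Int × Int) :=
  if PySem.Int.mod s 2 = 0 then
    (PySem.List.pyRange (min s (n - 1)) (max (-1) (s - n)) (-1)).map (fun r => (r, s - r))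
  else
    (PySem.List.pyRange (min s (n - 1)) (max (-1) (s - n)) (-1)).map (fun c => (s - c, c))

-- B's bucket of diagonal s after the first m rows have been processed (ascending r)
def ascPart (n m s : Int) : List (Int × Int) :=
  (PySem.List.pyRange (max 0 (s - n + 1)) (min (s + 1) m) 1).map (fun r => (r, s - r))

lemma zigEvenLoop_eq (n s : Int) :
    ∀ (k : Nat) (r : Int) (acc : List (Int × Int)), (r + 1).toNat ≤ k →
      zigEvenLoop n r (s - r) acc =
        acc ++ (PySem.List.pyRange r (max (-1) (s - n)) (-1)).map (fun r' => (r', s - r')) := by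
  intro k
  induction k with
  | zero =>
    intro r acc hk
    rw [zigEvenLoop]
    rw [if_neg (by omega), PySem.List.pyRange_neg_one_eq_nil (by omega)]
    simp
  | succ k ih =>
    intro r acc hk
    rw [zigEvenLoop]
    by_cases h : 0 ≤ r ∧ s - r < n
    · rw [if_pos h, PySem.List.pyRange_neg_one_cons (by omega)]
      have h1 : s - r + 1 = s - (r - 1) := by ring
      rw [h1, ih (r - 1) _ (by omega)]
      simp
    · rw [if_neg h, PySem.List.pyRange_neg_one_eq_nil (by omega)]
      simp

lemma zigOddLoop_eq (n s : Int) :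
    ∀ (k : Nat) (c : Int) (acc : List (Int × Int)), (c + 1).toNat ≤ k →
      zigOddLoop n (s - c) c acc =
        acc ++ (PySem.List.pyRange c (max (-1) (s - n)) (-1)).map (fun c' => (s - c', c')) := by
  intro k
  induction k with
  | zero =>
    intro c acc hk
    rw [zigOddLoop]
    rw [if_neg (by omega), PySem.List.pyRange_neg_one_eq_nil (by omega)]
    simp
  | succ k ih =>
    intro c acc hk
    rw [zigOddLoop]
    by_cases h : 0 ≤ c ∧ s - c < n
    · rw [if_pos h, PySem.List.pyRange_neg_one_cons (by omega)]
      have h1 : s - c + 1 = s - (c - 1) := by ring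
      rw [h1, ih (c - 1) _ (by omega)]
      simp
    · rw [if_neg h, PySem.List.pyRange_neg_one_eq_nil (by omega)]
      simp

lemma a_eq_flatMap (n : Int) :
    build_zigzag_py n = (PySem.List.pyRange 0 (2 * n - 1) 1).flatMap (zigDiag n) := by
  unfold build_zigzag_py
  have hstep : ((PySem.List.pyRange 0 (2 * n - 1) 1).foldl
      (fun idx s =>
        if PySem.Int.mod s 2 = 0 then
          let r := min s (n - 1)
          let c := s - r
          zigEvenLoop n r c idx
        else
          let c := min s (n - 1)
          let r := s - c
          zigOddLoop n r c idx) []) =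
      ((PySem.List.pyRange 0 (2 * n - 1) 1).foldl (fun idx s => idx ++ zigDiag n s) []) := by
    congr 1
    funext idx s
    by_cases h : PySem.Int.mod s 2 = 0
    · rw [if_pos h]
      show zigEvenLoop n (min s (n - 1)) (s - min s (n - 1)) idx = idx ++ zigDiag n s
      rw [zigEvenLoop_eq n s ((min s (n - 1)) + 1).toNat _ _ (le_refl _), zigDiag, if_pos h]
    · rw [if_neg h]
      show zigOddLoop n (s - min s (n - 1)) (min s (n - 1)) idx = idx ++ zigDiag n s
      rw [zigOddLoop_eq n s ((min s (n - 1)) + 1).toNat _ _ (le_refl _), zigDiag, if_neg h]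
  rw [hstep, PySem.List.foldl_append_eq_flatMap]
  simp

-- setting one slot of a range-indexed table
lemma pySetD_map_pyRange {α : Type} (f : Int → α) (N i : Int) (v : α)
    (h0 : 0 ≤ i) :
    PySem.List.pySetD ((PySem.List.pyRange 0 N 1).map f) i v
      = (PySem.List.pyRange 0 N 1).map (fun s => if s = i then v else f s) := by
  rw [PySem.List.pySetD_of_nonneg _ _ h0]
  apply List.ext_getElem
  · simp [PySem.List.length_pyRange_one]
  · intro k hk1 hk2
    simp only [List.getElem_set, List.getElem_map, PySem.List.getElem_pyRange_one]
    have hkN : k < (N - 0).toNat := by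
      simpa [PySem.List.length_pyRange_one] using hk2
    by_cases hki : k = i.toNat
    · rw [if_pos (by omega : i.toNat = k), if_pos (by omega : (0 : Int) + (k : Int) = i)]
    · rw [if_neg (by omega : ¬ i.toNat = k), if_neg (by omega : ¬ (0 : Int) + (k : Int) = i)]

-- one append to the bucket at slot i of a range-indexed table
lemma step_map (g : Int → List (Int × Int)) (N i : Int) (x : Int × Int)
    (h0 : 0 ≤ i) (h1 : i < N) :
    PySem.List.pySetD ((PySem.List.pyRange 0 N 1).map g) i
        (PySem.List.pyGetD ((PySem.List.pyRange 0 N 1).map g) i [] ++ [x])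
      = (PySem.List.pyRange 0 N 1).map (fun s => if s = i then g s ++ [x] else g s) := by
  rw [PySem.List.pyGetD_map_pyRange_of_nonneg g N i [] h0 h1,
    pySetD_map_pyRange g N i (g i ++ [x]) h0]
  apply List.map_congr_left
  intro s _
  by_cases h : s = i
  · rw [if_pos h, if_pos h, h]
  · rw [if_neg h, if_neg h]

-- B's inner c-loop on row r, acting on a range-indexed table of buckets
lemma inner_eq (N n r : Int) (g : Int → List (Int × Int)) (hr : 0 ≤ r) (hN : r + n ≤ N) :
    ∀ (k : Nat) (m : Int), m.toNat ≤ k → m ≤ n →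
      ((PySem.List.pyRange 0 m 1).foldl
        (fun d c => PySem.List.pySetD d (r + c) (PySem.List.pyGetD d (r + c) [] ++ [(r, c)]))
        ((PySem.List.pyRange 0 N 1).map g))
      = (PySem.List.pyRange 0 N 1).map
          (fun s => if r ≤ s ∧ s < r + m then g s ++ [(r, s - r)] else g s) := by
  intro k
  induction k with
  | zero =>
    intro m hk hm
    rw [show PySem.List.pyRange 0 m 1 = [] from PySem.List.pyRange_one_eq_nil (by omega)]
    simp only [List.foldl_nil]
    apply List.map_congr_left
    intro s _
    rw [if_neg (by omega)]
  | succ k ih =>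
    intro m hk hm
    by_cases hm0 : 0 < m
    · have hsplit : PySem.List.pyRange 0 m 1 = PySem.List.pyRange 0 (m - 1) 1 ++ [m - 1] := by
        have h := PySem.List.pyRange_one_succ_right (by omega : (0 : Int) ≤ m - 1)
        rw [show m - 1 + 1 = m from by omega] at h
        exact h
      have hone : ∀ (L : List (List (Int × Int))),
          List.foldl (fun d c =>
            PySem.List.pySetD d (r + c) (PySem.List.pyGetD d (r + c) [] ++ [(r, c)])) L [m - 1]
          = PySem.List.pySetD L (r + (m - 1))
              (PySem.List.pyGetD L (r + (m - 1)) [] ++ [(r, m - 1)]) := fun L => rfl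
      rw [hsplit, List.foldl_append, ih (m - 1) (by omega) (by omega), hone,
        step_map _ N (r + (m - 1)) _ (by omega) (by omega)]
      apply List.map_congr_left
      intro s hs
      rw [PySem.List.mem_pyRange_one] at hs
      by_cases h1 : s = r + (m - 1)
      · rw [if_pos h1, if_neg (by omega), if_pos (by omega)]
        have h2 : (r, m - 1) = (r, s - r) := by
          rw [show m - 1 = s - r from by omega]
        rw [h2]
      · rw [if_neg h1]
        by_cases h3 : r ≤ s ∧ s < r + (m - 1)
        · rw [if_pos h3, if_pos (by omega)]
        · rw [if_neg h3, if_neg (by omega)]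
    · rw [show PySem.List.pyRange 0 m 1 = [] from PySem.List.pyRange_one_eq_nil (by omega)]
      simp only [List.foldl_nil]
      apply List.map_congr_left
      intro s _
      rw [if_neg (by omega)]

lemma outer_eq (n : Int) :
    ∀ (k : Nat) (m : Int), m.toNat ≤ k → m ≤ n →
      ((PySem.List.pyRange 0 m 1).foldl
        (fun d r => (PySem.List.pyRange 0 n 1).foldl
          (fun d c => PySem.List.pySetD d (r + c) (PySem.List.pyGetD d (r + c) [] ++ [(r, c)])) d)
        ((PySem.List.pyRange 0 (2 * n - 1) 1).map (fun _ => ([] : List (Int × Int)))))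
      = (PySem.List.pyRange 0 (2 * n - 1) 1).map (ascPart n m) := by
  intro k
  induction k with
  | zero =>
    intro m hk hm
    rw [show PySem.List.pyRange 0 m 1 = [] from PySem.List.pyRange_one_eq_nil (by omega)]
    simp only [List.foldl_nil]
    apply List.map_congr_left
    intro s _
    unfold ascPart
    rw [show PySem.List.pyRange (max 0 (s - n + 1)) (min (s + 1) m) 1 = []
      from PySem.List.pyRange_one_eq_nil (by omega)]
    simp
  | succ k ih =>
    intro m hk hm
    by_cases hm0 : 0 < m
    · have hsplit : PySem.List.pyRange 0 m 1 = PySem.List.pyRange 0 (m - 1) 1 ++ [m - 1] := by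
        have h := PySem.List.pyRange_one_succ_right (by omega : (0 : Int) ≤ m - 1)
        rw [show m - 1 + 1 = m from by omega] at h
        exact h
      have hone : ∀ (L : List (List (Int × Int))),
          List.foldl (fun d r => (PySem.List.pyRange 0 n 1).foldl
            (fun d c =>
              PySem.List.pySetD d (r + c) (PySem.List.pyGetD d (r + c) [] ++ [(r, c)])) d)
            L [m - 1]
          = (PySem.List.pyRange 0 n 1).foldl
              (fun d c => PySem.List.pySetD d ((m - 1) + c)
                (PySem.List.pyGetD d ((m - 1) + c) [] ++ [(m - 1, c)])) L := fun L => rfl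
      rw [hsplit, List.foldl_append, ih (m - 1) (by omega) (by omega), hone,
        inner_eq (2 * n - 1) n (m - 1) (ascPart n (m - 1)) (by omega) (by omega)
          n.toNat n (le_refl _) (le_refl _)]
      apply List.map_congr_left
      intro s hs
      rw [PySem.List.mem_pyRange_one] at hs
      by_cases h1 : m - 1 ≤ s ∧ s < m - 1 + n
      · rw [if_pos h1]
        unfold ascPart
        rw [show min (s + 1) (m - 1) = m - 1 from by omega,
          show min (s + 1) m = (m - 1) + 1 from by omega,
          PySem.List.pyRange_one_succ_right (by omega : max 0 (s - n + 1) ≤ m - 1),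
          List.map_append]
        simp
      · rw [if_neg h1]
        unfold ascPart
        by_cases h2 : s < m - 1
        · rw [show min (s + 1) (m - 1) = min (s + 1) m from by omega]
        · rw [show PySem.List.pyRange (max 0 (s - n + 1)) (min (s + 1) (m - 1)) 1 = []
              from PySem.List.pyRange_one_eq_nil (by omega),
            show PySem.List.pyRange (max 0 (s - n + 1)) (min (s + 1) m) 1 = []
              from PySem.List.pyRange_one_eq_nil (by omega)]
    · rw [show PySem.List.pyRange 0 m 1 = [] from PySem.List.pyRange_one_eq_nil (by omega)]
      simp only [List.foldl_nil]
      apply List.map_congr_left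
      intro s _
      unfold ascPart
      rw [show PySem.List.pyRange (max 0 (s - n + 1)) (min (s + 1) m) 1 = []
        from PySem.List.pyRange_one_eq_nil (by omega)]
      simp

lemma enumerate_map_pyRange {α : Type} (f : Int → α) :
    ∀ (k : Nat) (a b : Int), (b - a).toNat ≤ k →
      PySem.List.enumerate ((PySem.List.pyRange a b 1).map f) a
        = (PySem.List.pyRange a b 1).map (fun s => (s, f s)) := by
  intro k
  induction k with
  | zero =>
    intro a b hk
    rw [PySem.List.pyRange_one_eq_nil (by omega)]
    simp
  | succ k ih =>
    intro a b hk
    by_cases hab : a < b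
    · rw [PySem.List.pyRange_one_cons hab]
      simp only [List.map_cons, PySem.List.enumerate_cons]
      rw [ih (a + 1) b (by omega)]
    · rw [PySem.List.pyRange_one_eq_nil (by omega)]
      simp

-- each diagonal of A's walk is B's ascending bucket, reversed on even diagonals
lemma zigDiag_eq_ascPart (n s : Int) :
    zigDiag n s = if PySem.Int.mod s 2 = 0 then (ascPart n n s).reverse else ascPart n n s := by
  unfold zigDiag ascPart
  by_cases h : PySem.Int.mod s 2 = 0
  · rw [if_pos h, if_pos h, PySem.List.pyRange_neg_one_eq_reverse, List.map_reverse,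
      show max (-1) (s - n) + 1 = max 0 (s - n + 1) from by omega,
      show min s (n - 1) + 1 = min (s + 1) n from by omega]
  · rw [if_neg h, if_neg h]
    apply List.ext_getElem
    · simp only [List.length_map, PySem.List.length_pyRange_neg_one,
        PySem.List.length_pyRange_one]
      omega
    · intro k h1 h2
      simp only [List.length_map, PySem.List.length_pyRange_neg_one] at h1
      simp only [List.getElem_map, PySem.List.pyRange_neg_one, PySem.List.pyRange_one,
        List.getElem_range, Prod.mk.injEq]
      exact ⟨by omega, by omega⟩

lemma alt_eq_flatMap (n : Int) :
    build_zigzag_py_alt n = (PySem.List.pyRange 0 (2 * n - 1) 1).flatMap (zigDiag n) := by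
  show (PySem.List.enumerate
      ((PySem.List.pyRange 0 n 1).foldl
        (fun d r => (PySem.List.pyRange 0 n 1).foldl
          (fun d c =>
            PySem.List.pySetD d (r + c) (PySem.List.pyGetD d (r + c) [] ++ [(r, c)])) d)
        ((PySem.List.pyRange 0 (2 * n - 1) 1).map (fun _ => ([] : List (Int × Int)))))).foldl
      (fun out sd => out ++ (if PySem.Int.mod sd.1 2 = 0 then sd.2.reverse else sd.2)) []
    = (PySem.List.pyRange 0 (2 * n - 1) 1).flatMap (zigDiag n)
  rw [outer_eq n n.toNat n (le_refl _) (le_refl _),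
    enumerate_map_pyRange (ascPart n n) (2 * n - 1 - 0).toNat 0 (2 * n - 1) (le_refl _),
    PySem.List.foldl_append_eq_flatMap, List.flatMap_map]
  have hfun : (fun s => if PySem.Int.mod (s, ascPart n n s).1 2 = 0
        then (s, ascPart n n s).2.reverse else (s, ascPart n n s).2)
      = zigDiag n := by
    funext s
    exact (zigDiag_eq_ascPart n s).symm
  rw [hfun]
  simp

-- ===== VERDICT (by name: the statement is the Claim_ definition above) =====
theorem build_zigzag_py_spec : Claim_equal_build_zigzag_py := by
  intro n _
  unfold Spec_build_zigzag_py
  rw [alt_eq_flatMap, a_eq_flatMap]
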